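-- pv_equiv track=rewrite | github.com/taigikeyboard/taigi-converter | src/taigi_converter/converter.py | _detect_case
-- ===== SOURCE A (Python) =====
-- def _detect_case(text):
--     alpha = "".join(c for c in text if c.isalpha())
--     if not alpha:
--         return "lower"
--     if alpha.isupper():
--         return "upper"
--     if alpha[0].isupper():
--         return "title"
--     return "lower"
-- ===== SOURCE B (Python) =====
-- def _detect_case(text):
--     # Decision tree on the first letter and the presence of a later lowercase letter:
--     # skip the non-letter prefix; no letter -> lower; first letter lowercase -> lower;
--     # first letter uppercase -> title iff any lowercase letter follows, else upper.
--     i = 0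
--     while i < len(text) and not text[i].isalpha():
--         i += 1
--     if i == len(text):
--         return "lower"
--     if text[i].islower():
--         return "lower"
--     if any(c.islower() for c in text[i + 1:]):
--         return "title"
--     return "upper"
-- ===== Notes on version B (the rewrite author's own statement) =====
-- stated objective: faster
-- what changed: Replaces A's build-the-filtered-string-and-test-isupper logic by a decision tree: skip the non-letter prefix, branch on whether the first letter is lowercase, and otherwise on whether any lowercase letter follows; no filtered string is ever built and the lowercase scan short-circuits.
import Mathlib
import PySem

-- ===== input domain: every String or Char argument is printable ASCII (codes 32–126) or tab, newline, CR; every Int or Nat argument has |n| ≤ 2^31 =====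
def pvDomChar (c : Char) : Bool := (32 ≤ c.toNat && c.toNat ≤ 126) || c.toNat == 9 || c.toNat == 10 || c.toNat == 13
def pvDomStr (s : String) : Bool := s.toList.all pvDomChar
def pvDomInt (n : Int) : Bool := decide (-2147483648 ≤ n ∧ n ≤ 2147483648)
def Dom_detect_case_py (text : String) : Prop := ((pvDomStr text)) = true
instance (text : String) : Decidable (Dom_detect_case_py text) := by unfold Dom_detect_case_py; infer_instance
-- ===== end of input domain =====

-- B replaces A's filtered-string + isupper test by a decision tree: skip the non-letter
-- prefix, branch on the first letter's case and on whether a lowercase letter follows.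

-- ===== PORT A =====
-- hand-port of str.isupper(): at least one cased character and no lowercase one (exact on ASCII)
def pvStrIsupper (cs : List Char) : Bool :=
  cs.any (fun c => PySem.Chars.isupper c || PySem.Chars.islower c) &&
  cs.all (fun c => !PySem.Chars.islower c)

def detect_case_py (text : String) : String :=
  let alpha := text.toList.filter PySem.Chars.isalpha
  if alpha.isEmpty then "lower"
  else if pvStrIsupper alpha then "upper"
  else if PySem.Chars.isupper (alpha.headD ' ') then "title"  -- alpha[0]: alpha is nonempty here
  else "lower"

-- ===== PORT B =====
-- Source B's while loop advancing i past non-letters: recursion on the remaining suffix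
def pvSkipNonAlpha : List Char → List Char
  | [] => []
  | c :: cs => if PySem.Chars.isalpha c then c :: cs else pvSkipNonAlpha cs

def detect_case_py_alt (text : String) : String :=
  match pvSkipNonAlpha text.toList with
  | [] => "lower"                                  -- i == len(text)
  | c :: rest =>
    if PySem.Chars.islower c then "lower"
    else if rest.any PySem.Chars.islower then "title"   -- any(... for c in text[i+1:])
    else "upper"

-- ===== PRECONDITION & SPEC =====
def Spec_detect_case_py (text : String) (out : String) : Prop := out = detect_case_py_alt text
instance (text : String) (out : String) : Decidable (Spec_detect_case_py text out) := by unfold Spec_detect_case_py; infer_instance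

-- ===== CLAIM (what is proved, stated in full; the proofs are below) =====
def Claim_equal_detect_case_py : Prop := ∀ (text : String), Dom_detect_case_py text → Spec_detect_case_py text (detect_case_py text)

-- ===== LEMMAS AND PROOFS =====

theorem pv_lower_alpha (c : Char) (h : PySem.Chars.islower c = true) :
    PySem.Chars.isalpha c = true := by
  simp only [PySem.Chars.isalpha, h, Bool.or_true]

theorem pv_lower_not_upper (c : Char) (h : PySem.Chars.islower c = true) :
    PySem.Chars.isupper c = false := by
  have e1 : 'a'.val.toNat = 97 := rfl
  have e2 : 'Z'.val.toNat = 90 := rfl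
  simp only [PySem.Chars.isupper, PySem.Chars.islower, Bool.and_eq_true, Bool.and_eq_false_iff,
    decide_eq_true_eq, decide_eq_false_iff_not, not_le, Char.le_def,
    UInt32.le_iff_toNat_le, e1, e2] at *
  omega

theorem pv_alpha_not_lower_upper (c : Char) (ha : PySem.Chars.isalpha c = true)
    (hl : PySem.Chars.islower c = false) : PySem.Chars.isupper c = true := by
  simp only [PySem.Chars.isalpha, hl, Bool.or_false] at ha
  exact ha

theorem pv_any_lower_filter (cs : List Char) :
    (cs.filter PySem.Chars.isalpha).any PySem.Chars.islower = cs.any PySem.Chars.islower := by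
  induction cs with
  | nil => rfl
  | cons c cs ih =>
    simp only [List.filter_cons]
    by_cases h : PySem.Chars.isalpha c = true
    · simp [h, ih]
    · have hl : PySem.Chars.islower c = false := by
        cases hc : PySem.Chars.islower c
        · rfl
        · exact absurd (pv_lower_alpha c hc) h
      simp [h, hl, ih]

theorem pv_core (cs : List Char) :
    (let alpha := cs.filter PySem.Chars.isalpha
     if alpha.isEmpty then "lower"
     else if pvStrIsupper alpha then "upper"
     else if PySem.Chars.isupper (alpha.headD ' ') then "title"
     else "lower")
    = (match pvSkipNonAlpha cs with
       | [] => "lower"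
       | c :: rest =>
         if PySem.Chars.islower c then "lower"
         else if rest.any PySem.Chars.islower then "title"
         else "upper") := by
  induction cs with
  | nil => rfl
  | cons c cs ih =>
    by_cases h : PySem.Chars.isalpha c = true
    · simp only [List.filter_cons, h, if_pos, pvSkipNonAlpha, List.isEmpty_cons,
        List.headD_cons, Bool.false_eq_true, if_false]
      by_cases hl : PySem.Chars.islower c = true
      · have hu := pv_lower_not_upper c hl
        have hsup : pvStrIsupper (c :: cs.filter PySem.Chars.isalpha) = false := by
          simp [pvStrIsupper, hl]
        simp [hsup, hu, hl]
      · have hl' : PySem.Chars.islower c = false := by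
          cases hc : PySem.Chars.islower c
          · rfl
          · exact absurd hc hl
        have hu := pv_alpha_not_lower_upper c h hl'
        have hsup : pvStrIsupper (c :: cs.filter PySem.Chars.isalpha) =
            !(cs.any PySem.Chars.islower) := by
          simp [pvStrIsupper, PySem.Chars.isalpha , ← pv_any_lower_filter cs, hl', hu,
            List.all_eq_not_any_not]
        by_cases hany : cs.any PySem.Chars.islower = true
        · simp [hsup, hany, hu, hl']
        · simp only [Bool.not_eq_true] at hany
          simp [hsup, hany, hl']
    · have hl : PySem.Chars.islower c = false := by
        cases hc : PySem.Chars.islower c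
        · rfl
        · exact absurd (pv_lower_alpha c hc) h
      simpa only [List.filter_cons, h, Bool.false_eq_true, if_false, pvSkipNonAlpha,
        if_neg h] using ih

-- ===== VERDICT (by name: the statement is the Claim_ definition above) =====
theorem detect_case_py_spec : Claim_equal_detect_case_py := by
  intro text _
  unfold Spec_detect_case_py detect_case_py detect_case_py_alt
  exact pv_core text.toList
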